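-- pv_equiv track=rewrite | github.com/shan2312/DSA-Python-Solutions | prefix-sum/maxSumGoodSubarray.py | getMaxSumGoodSubarray
-- ===== SOURCE A (Python) =====
-- from math import inf
--
-- def getMaxSumGoodSubarray(nums, k):
--     valToPrefixSum = {}
--     prefixSum = 0
--     maxSum = -inf
--
--     for i in range(len(nums)):
--         endElement = nums[i]
--         firstElement1 = endElement - k
--         firstElement2 = endElement + k
--
--         if valToPrefixSum.get(nums[i], inf) > prefixSum:
--             valToPrefixSum[nums[i]] = prefixSum
--
--         prefixSum += nums[i]
--
--         if firstElement1 in valToPrefixSum: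
--             maxSum = max(maxSum, prefixSum - valToPrefixSum[firstElement1])
--
--         if firstElement2 in valToPrefixSum:
--             maxSum = max(maxSum, prefixSum - valToPrefixSum[firstElement2])
--
--     return maxSum if maxSum != -inf else 0
-- ===== SOURCE B (Python) =====
-- def getMaxSumGoodSubarray(nums, k):
--     best = None
--     seen = []   # elements processed so far, in order
--     ps = 0      # sum of seen
--     for v in nums:
--         seen.append(v)
--         ps += v
--         # min prefix-sum over starts j whose element pairs with v (|v - seen[j]| matches k either way)
--         m = None
--         q = 0
--         for u in seen:
--             if u == v - k or u == v + k:
--                 if m is None or q < m: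
--                     m = q
--             q += u
--         if m is not None:
--             s = ps - m
--             if best is None or s > best:
--                 best = s
--     return best if best is not None else 0
-- ===== Notes on version B (the rewrite author's own statement) =====
-- stated objective: simpler
-- what changed: Replaces the dict of min-prefix-sums with a plain quadratic scan: for each position a nested loop over the processed prefix finds the minimum prefix sum at a matching start element, no hash map and no per-value bookkeeping.
import Mathlib
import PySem

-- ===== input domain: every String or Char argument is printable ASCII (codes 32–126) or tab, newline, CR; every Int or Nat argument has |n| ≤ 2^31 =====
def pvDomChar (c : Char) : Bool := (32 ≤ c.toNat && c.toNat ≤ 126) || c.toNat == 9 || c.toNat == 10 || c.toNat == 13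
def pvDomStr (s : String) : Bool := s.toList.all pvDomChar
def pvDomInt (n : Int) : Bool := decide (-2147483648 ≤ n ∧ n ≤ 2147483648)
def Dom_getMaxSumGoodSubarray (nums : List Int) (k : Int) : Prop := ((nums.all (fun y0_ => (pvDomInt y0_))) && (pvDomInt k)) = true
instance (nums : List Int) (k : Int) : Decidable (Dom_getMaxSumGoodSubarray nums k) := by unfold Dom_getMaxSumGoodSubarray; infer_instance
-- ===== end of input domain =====

-- B replaces A's value→min-prefix-sum dict by a plain nested scan over the processed
-- prefix (simpler, no hash map); equivalence of the two is proved below.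

-- ===== PORT A =====
-- one loop iteration of A (the body of `for i in range(len(nums))`; only nums[i] is used)
def pvStepA (k : Int) (st : PySem.Dict Int Int × Int × Option Int) (v : Int) :
    PySem.Dict Int Int × Int × Option Int :=
  let d := st.1
  let ps := st.2.1
  let mx := st.2.2
  let firstElement1 := v - k
  let firstElement2 := v + k
  -- if valToPrefixSum.get(nums[i], inf) > prefixSum: valToPrefixSum[nums[i]] = prefixSum
  let d' := if (match d.get? v with | none => true | some w => decide (ps < w)) = true
            then d.insert v ps else d
  let ps' := ps + v
  -- maxSum starts at -inf, modelled as `none`; max(-inf, c) = c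
  let mx1 := match d'.get? firstElement1 with
    | none => mx
    | some w => some (match mx with | none => ps' - w | some a => max a (ps' - w))
  let mx2 := match d'.get? firstElement2 with
    | none => mx1
    | some w => some (match mx1 with | none => ps' - w | some a => max a (ps' - w))
  (d', ps', mx2)

def getMaxSumGoodSubarray (nums : List Int) (k : Int) : Int :=
  let st := nums.foldl (pvStepA k) (PySem.Dict.empty, 0, none)
  -- return maxSum if maxSum != -inf else 0
  match st.2.2 with | none => 0 | some m => m

-- ===== PORT B =====
-- inner loop of B: scan `seen`, tracking (m, q) = (min prefix sum at a matching start, running prefix sum)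
def pvInnerB (t1 t2 : Int) (st : Option Int × Int) (u : Int) : Option Int × Int :=
  let m := st.1
  let q := st.2
  let m' := if u = t1 ∨ u = t2 then
      (match m with | none => some q | some w => if q < w then some q else some w)
    else m
  (m', q + u)

-- outer loop of B: state (best, seen, ps)
def pvStepB (k : Int) (st : Option Int × List Int × Int) (v : Int) :
    Option Int × List Int × Int :=
  let best := st.1
  let seen := st.2.1
  let ps := st.2.2
  let seen' := seen ++ [v]
  let ps' := ps + v
  let m := (seen'.foldl (pvInnerB (v - k) (v + k)) (none, 0)).1
  let best' := match m with
    | none => best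
    | some mm =>
        let s := ps' - mm
        (match best with | none => some s | some b => if s > b then some s else some b)
  (best', seen', ps')

def getMaxSumGoodSubarray_alt (nums : List Int) (k : Int) : Int :=
  let st := nums.foldl (pvStepB k) (none, [], 0)
  match st.1 with | none => 0 | some b => b

-- ===== PRECONDITION & SPEC =====
def Spec_getMaxSumGoodSubarray (nums : List Int) (k : Int) (out : Int) : Prop := out = getMaxSumGoodSubarray_alt nums k
instance (nums : List Int) (k : Int) (out : Int) : Decidable (Spec_getMaxSumGoodSubarray nums k out) := by unfold Spec_getMaxSumGoodSubarray; infer_instance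

-- ===== CLAIM (what is proved, stated in full; the proofs are below) =====
def Claim_equal_getMaxSumGoodSubarray : Prop := ∀ (nums : List Int) (k : Int), Dom_getMaxSumGoodSubarray nums k → Spec_getMaxSumGoodSubarray nums k (getMaxSumGoodSubarray nums k)

-- ===== LEMMAS AND PROOFS =====

-- merge of two optional minima
def pvOmerge : Option Int → Option Int → Option Int
  | none, b => b
  | some a, none => some a
  | some a, some b => some (min a b)

-- min over {prefix sums (starting from q) at positions of `seen` holding t}, none if t absent
def pvMinPre (t : Int) : List Int → Int → Option Int
  | [], _ => none
  | u :: rest, q =>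
      if u = t then pvOmerge (some q) (pvMinPre t rest (q + u)) else pvMinPre t rest (q + u)

-- A's single conditional max-update, and B's
def pvUpd (mx : Option Int) (p : Int) (o : Option Int) : Option Int :=
  match o with
  | none => mx
  | some w => some (match mx with | none => p - w | some a => max a (p - w))

def pvUpdB (best : Option Int) (p : Int) (o : Option Int) : Option Int :=
  match o with
  | none => best
  | some mm =>
      let s := p - mm
      (match best with | none => some s | some b => if s > b then some s else some b)

theorem pvOmerge_none_left (b : Option Int) : pvOmerge none b = b := rfl

theorem pvOmerge_assoc (a b c : Option Int) :
    pvOmerge (pvOmerge a b) c = pvOmerge a (pvOmerge b c) := by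
  rcases a <;> rcases b <;> rcases c <;> simp [pvOmerge]

theorem pvOmerge_key1 (m A B : Option Int) (q : Int) :
    pvOmerge (pvOmerge m (some q)) (pvOmerge A B)
      = pvOmerge m (pvOmerge (pvOmerge (some q) A) (pvOmerge (some q) B)) := by
  rcases m <;> rcases A <;> rcases B <;> simp [pvOmerge]
  all_goals omega

theorem pvOmerge_key2 (m A B : Option Int) (q : Int) :
    pvOmerge (pvOmerge m (some q)) (pvOmerge A B)
      = pvOmerge m (pvOmerge (pvOmerge (some q) A) B) := by
  rcases m <;> rcases A <;> rcases B <;> simp [pvOmerge]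

theorem pvOmerge_key3 (m A B : Option Int) (q : Int) :
    pvOmerge (pvOmerge m (some q)) (pvOmerge A B)
      = pvOmerge m (pvOmerge A (pvOmerge (some q) B)) := by
  rcases m <;> rcases A <;> rcases B <;> simp [pvOmerge]
  all_goals omega

theorem pvInnerB_eq (t1 t2 : Int) (m : Option Int) (q u : Int) :
    pvInnerB t1 t2 (m, q) u
      = (if u = t1 ∨ u = t2 then pvOmerge m (some q) else m, q + u) := by
  rcases m with _ | w <;> by_cases h : u = t1 ∨ u = t2 <;>
    simp [pvInnerB, pvOmerge, h]
  all_goals split_ifs <;> simp <;> omega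

-- B's inner fold computes the merged minimum of the two single-target minima
theorem pvInner_eq (t1 t2 : Int) :
    ∀ (seen : List Int) (m : Option Int) (q : Int),
      (seen.foldl (pvInnerB t1 t2) (m, q)).1
        = pvOmerge m (pvOmerge (pvMinPre t1 seen q) (pvMinPre t2 seen q)) := by
  intro seen
  induction seen with
  | nil => intro m q; rcases m <;> simp [pvMinPre, pvOmerge]
  | cons u rest ih =>
      intro m q
      rw [List.foldl_cons, pvInnerB_eq, ih]
      by_cases h1 : u = t1 <;> by_cases h2 : u = t2
      · simp only [pvMinPre, if_pos h1, if_pos h2, if_pos (Or.inl h1)]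
        exact pvOmerge_key1 m _ _ q
      · simp only [pvMinPre, if_pos h1, if_neg h2, if_pos (Or.inl h1)]
        exact pvOmerge_key2 m _ _ q
      · simp only [pvMinPre, if_neg h1, if_pos h2, if_pos (Or.inr h2)]
        exact pvOmerge_key3 m _ _ q
      · simp only [pvMinPre, if_neg h1, if_neg h2,
          if_neg (by simp [h1, h2] : ¬ (u = t1 ∨ u = t2))]

-- appending one element extends the minimum with the prefix sum q + seen.sum
theorem pvMinPre_append (t v : Int) :
    ∀ (seen : List Int) (q : Int),
      pvMinPre t (seen ++ [v]) q
        = if v = t then pvOmerge (pvMinPre t seen q) (some (q + seen.sum))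
          else pvMinPre t seen q := by
  intro seen
  induction seen with
  | nil => intro q; by_cases hv : v = t <;> simp [pvMinPre, pvOmerge, hv]
  | cons u rest ih =>
      intro q
      have hsum : q + (u + rest.sum) = (q + u) + rest.sum := by ring
      by_cases hu : u = t
      · simp only [List.cons_append, pvMinPre, if_pos hu, ih, List.sum_cons, hsum]
        by_cases hv : v = t
        · simp only [if_pos hv, pvOmerge_assoc]
        · simp [hv]
      · simp only [List.cons_append, pvMinPre, if_neg hu, ih, List.sum_cons, hsum]

-- the two sequential max-updates of A equal B's single update with the merged minimum
theorem pvUpd_eq (mx w1 w2 : Option Int) (p : Int) :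
    pvUpd (pvUpd mx p w1) p w2 = pvUpdB mx p (pvOmerge w1 w2) := by
  rcases w1 with _ | x <;> rcases w2 with _ | y <;> rcases mx with _ | a <;>
    simp [pvUpd, pvUpdB, pvOmerge]
  all_goals first
    | omega
    | (split_ifs <;> simp only [Option.some.injEq] <;> omega)

-- one step of each loop, written with the helpers (definitional)
theorem pvStepA_eq (k : Int) (d : PySem.Dict Int Int) (ps : Int) (mx : Option Int) (v : Int) :
    pvStepA k (d, ps, mx) v
      = ((if (match d.get? v with | none => true | some w => decide (ps < w)) = true
          then d.insert v ps else d),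
         ps + v,
         pvUpd (pvUpd mx (ps + v)
             ((if (match d.get? v with | none => true | some w => decide (ps < w)) = true
               then d.insert v ps else d).get? (v - k)))
           (ps + v)
           ((if (match d.get? v with | none => true | some w => decide (ps < w)) = true
             then d.insert v ps else d).get? (v + k))) := rfl

theorem pvStepB_eq (k : Int) (mx : Option Int) (seen : List Int) (ps : Int) (v : Int) :
    pvStepB k (mx, seen, ps) v
      = (pvUpdB mx (ps + v)
           (((seen ++ [v]).foldl (pvInnerB (v - k) (v + k)) (none, 0)).1),
         seen ++ [v], ps + v) := rfl

-- main invariant: with d.get? t = pvMinPre t seen 0 and ps = seen.sum, the two folds agree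
theorem pvMain (k : Int) :
    ∀ (rest seen : List Int) (d : PySem.Dict Int Int) (ps : Int) (mx : Option Int),
      ps = seen.sum →
      (∀ t, d.get? t = pvMinPre t seen 0) →
      (rest.foldl (pvStepA k) (d, ps, mx)).2.2 = (rest.foldl (pvStepB k) (mx, seen, ps)).1 := by
  intro rest
  induction rest with
  | nil => intro seen d ps mx hps hd; rfl
  | cons v rest ih =>
      intro seen d ps mx hps hd
      rw [List.foldl_cons, List.foldl_cons, pvStepA_eq, pvStepB_eq]
      rw [pvInner_eq, pvOmerge_none_left]
      set d' := (if (match d.get? v with | none => true | some w => decide (ps < w)) = true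
                 then d.insert v ps else d) with hd'def
      have hd' : ∀ t, d'.get? t = pvMinPre t (seen ++ [v]) 0 := by
        intro t
        rw [pvMinPre_append]
        rcases hget : d.get? v with _ | w
        · have hins : d' = d.insert v ps := by rw [hd'def, hget]; rfl
          rw [hins, PySem.Dict.get?_insert]
          by_cases h : t = v
          · subst h
            rw [if_pos rfl, if_pos rfl, ← hd t, hget]
            simp [pvOmerge, hps]
          · rw [if_neg h, if_neg (fun hv => h hv.symm), hd t]
        · by_cases hlt : ps < w
          · have hins : d' = d.insert v ps := by
              rw [hd'def, hget]; simp [hlt]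
            rw [hins, PySem.Dict.get?_insert]
            by_cases h : t = v
            · subst h
              rw [if_pos rfl, if_pos rfl, ← hd t, hget]
              simp only [pvOmerge, Option.some.injEq]
              omega
            · rw [if_neg h, if_neg (fun hv => h hv.symm), hd t]
          · have hins : d' = d := by
              rw [hd'def, hget]; simp [hlt]
            rw [hins]
            by_cases h : t = v
            · subst h
              rw [if_pos rfl, hd t, ← hd t, hget]
              simp only [pvOmerge, Option.some.injEq]
              omega
            · rw [if_neg (fun hv => h hv.symm), hd t]
      rw [hd' (v - k), hd' (v + k), pvUpd_eq]
      exact ih (seen ++ [v]) d' (ps + v) _ (by simp [hps]) hd'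

-- ===== VERDICT (by name: the statement is the Claim_ definition above) =====
theorem getMaxSumGoodSubarray_spec : Claim_equal_getMaxSumGoodSubarray := by
  intro nums k _
  have h := pvMain k nums [] PySem.Dict.empty 0 none rfl
    (by intro t; simp [pvMinPre, PySem.Dict.get?_empty])
  show (match (nums.foldl (pvStepA k) (PySem.Dict.empty, 0, none)).2.2 with
        | none => (0 : Int) | some m => m)
      = (match (nums.foldl (pvStepB k) (none, [], 0)).1 with
        | none => (0 : Int) | some b => b)
  rw [h]
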